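-- pv_equiv track=rewrite | github.com/MKilani/EgyVoc | distribution_0.0.10/build/lib/EgyVoc/parserData/joinReconstructions/__init__.py | extractConsonants
-- ===== SOURCE A (Python) =====
-- def extractConsonants(classes, phonemes):
--     consonants = ""
--     for i in range(0, len(classes)):
--         if classes[i] == "C":
--             consonants = consonants + phonemes[i]
--
--             consonants = consonants.replace("š", "ʃ")\
--             .replace("ꜣ", "ʔ")\
--             .replace("ꜥ", "ʕ")\
--             .replace("ṯ", "c")\
--             .replace("ḏ", "ɟ")\
--             .replace("ẖ", "ç")\
--             .replace("ḫ", "χ")\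
--             .replace("ḥ", "ħ")\
--             .replace("y", "ɥ")
--
--
--     return consonants
-- ===== SOURCE B (Python) =====
-- def extractConsonants(classes, phonemes):
--     trans = {"š": "ʃ", "ꜣ": "ʔ", "ꜥ": "ʕ", "ṯ": "c", "ḏ": "ɟ", "ẖ": "ç",
--              "ḫ": "χ", "ḥ": "ħ", "y": "ɥ"}
--     out = []
--     for i in range(len(classes)):
--         if classes[i] == "C":
--             for c in phonemes[i]:
--                 out.append(trans.get(c, c))
--     return "".join(out)
-- ===== Notes on version B (the rewrite author's own statement) =====
-- stated objective: simpler
-- what changed: Instead of growing a string and re-scanning the whole accumulated result with nine chained .replace calls on every consonant, B makes a single pass that maps each character of a consonant phoneme through a translation dict (get(c, c)) and joins the collected pieces once at the end.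
import Mathlib
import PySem

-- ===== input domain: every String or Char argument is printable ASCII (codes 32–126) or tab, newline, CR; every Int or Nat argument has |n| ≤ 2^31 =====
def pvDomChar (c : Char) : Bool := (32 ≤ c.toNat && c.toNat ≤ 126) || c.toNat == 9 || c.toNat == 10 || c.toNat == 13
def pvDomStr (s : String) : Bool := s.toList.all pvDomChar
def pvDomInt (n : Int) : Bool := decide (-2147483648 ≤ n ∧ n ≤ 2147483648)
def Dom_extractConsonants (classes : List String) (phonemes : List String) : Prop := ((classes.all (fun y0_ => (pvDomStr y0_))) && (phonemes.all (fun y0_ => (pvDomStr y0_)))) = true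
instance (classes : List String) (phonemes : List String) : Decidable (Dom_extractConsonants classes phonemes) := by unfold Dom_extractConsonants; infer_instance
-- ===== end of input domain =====

-- B replaces A's grow-string-and-rescan-with-nine-replaces loop by a single pass with a
-- translation table, joining the mapped characters once at the end (objective: simpler/idiomatic).

-- ===== PORT A =====
-- the nine chained .replace calls of A, in A's order
def pvRepl (s : String) : String :=
  PySem.Str.replace (PySem.Str.replace (PySem.Str.replace (PySem.Str.replace (PySem.Str.replace
    (PySem.Str.replace (PySem.Str.replace (PySem.Str.replace (PySem.Str.replace s
      "š" "ʃ") "ꜣ" "ʔ") "ꜥ" "ʕ") "ṯ" "c") "ḏ" "ɟ") "ẖ" "ç") "ḫ" "χ") "ḥ" "ħ") "y" "ɥ"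

-- phonemes[i] is ported with pyGetD; Pre_ below excludes exactly the out-of-range accesses
-- on which the Python raises IndexError (classes[i] is always in range, i ∈ range(len(classes))).
def extractConsonants (classes : List String) (phonemes : List String) : String :=
  (PySem.List.pyRange 0 (classes.length : Int) 1).foldl
    (fun consonants i =>
      if PySem.List.pyGetD classes i "" = "C" then
        pvRepl (consonants ++ PySem.List.pyGetD phonemes i "")
      else consonants) ""

-- ===== PORT B =====
def pvTrans : PySem.Dict String String :=
  PySem.Dict.ofList [("š", "ʃ"), ("ꜣ", "ʔ"), ("ꜥ", "ʕ"), ("ṯ", "c"), ("ḏ", "ɟ"),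
                     ("ẖ", "ç"), ("ḫ", "χ"), ("ḥ", "ħ"), ("y", "ɥ")]

-- 'for c in phonemes[i]' iterates 1-character strings: c ↦ String.ofList [c]
def extractConsonants_alt (classes : List String) (phonemes : List String) : String :=
  PySem.Str.join ""
    ((PySem.List.pyRange 0 (classes.length : Int) 1).foldl
      (fun out i =>
        if PySem.List.pyGetD classes i "" = "C" then
          (PySem.List.pyGetD phonemes i "").toList.foldl
            (fun out c => out ++ [PySem.Dict.getD pvTrans (String.ofList [c]) (String.ofList [c])]) out
        else out) [])

-- ===== PRECONDITION & SPEC =====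
-- Pre_ excludes exactly the inputs on which the Python A raises IndexError:
-- some index i with classes[i] == "C" but i out of range for phonemes.
def Pre_extractConsonants (classes : List String) (phonemes : List String) : Prop :=
  ∀ i : Nat, i < classes.length → classes.getD i "" = "C" → i < phonemes.length

instance (classes : List String) (phonemes : List String) : Decidable (Pre_extractConsonants classes phonemes) := by
  unfold Pre_extractConsonants; infer_instance

def pvWitness_extractConsonants : List String × List String :=
  (["C", "V", "C"], ["p", "a", "t"])

def Spec_extractConsonants (classes : List String) (phonemes : List String) (out : String) : Prop := out = extractConsonants_alt classes phonemes
instance (classes : List String) (phonemes : List String) (out : String) : Decidable (Spec_extractConsonants classes phonemes out) := by unfold Spec_extractConsonants; infer_instance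

-- ===== CLAIM (what is proved, stated in full; the proofs are below) =====
def Claim_equal_extractConsonants : Prop := ∀ (classes : List String) (phonemes : List String), Dom_extractConsonants classes phonemes → Pre_extractConsonants classes phonemes → Spec_extractConsonants classes phonemes (extractConsonants classes phonemes)

-- ===== LEMMAS AND PROOFS =====

-- the per-character effect of A's nine replacements (= B's translation table as a function)
def pvSub (o n c : Char) : Char := if c = o then n else c

def pvMap (c : Char) : Char :=
  if c = 'š' then 'ʃ' else if c = 'ꜣ' then 'ʔ' else if c = 'ꜥ' then 'ʕ' else
  if c = 'ṯ' then 'c' else if c = 'ḏ' then 'ɟ' else if c = 'ẖ' then 'ç' else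
  if c = 'ḫ' then 'χ' else if c = 'ḥ' then 'ħ' else if c = 'y' then 'ɥ' else c

-- single-character replace is a character map
theorem pvReplace_go_single (o n : Char) :
    ∀ (fuel : Nat) (l acc : List Char), l.length ≤ fuel →
      PySem.Chars.replace.go [o] [n] fuel l acc
        = acc.reverse ++ l.map (pvSub o n) := by
  intro fuel
  induction fuel with
  | zero =>
    intro l acc h
    have : l = [] := List.length_eq_zero_iff.mp (Nat.le_zero.mp h)
    subst this; simp [PySem.Chars.replace.go]
  | succ m ih =>
    intro l acc h
    cases l with
    | nil => simp [PySem.Chars.replace.go]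
    | cons c t =>
      simp only [PySem.Chars.replace.go]
      by_cases hc : c = o
      · subst hc
        have hp : [c].isPrefixOf (c :: t) = true := by simp [List.isPrefixOf]
        rw [if_pos hp, show List.drop [c].length (c :: t) = t from rfl,
          ih t _ (by simpa using h)]
        simp [pvSub]
      · have hp : [o].isPrefixOf (c :: t) = false := by
          simp only [List.isPrefixOf, Bool.and_eq_false_iff]
          left
          exact beq_eq_false_iff_ne.mpr (fun h' => hc h'.symm)
        rw [if_neg (by simp [hp]), ih t _ (by simpa using h)]
        simp [pvSub, hc]

theorem pvReplace_single (s : List Char) (o n : Char) :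
    PySem.Chars.replace s [o] [n] = s.map (pvSub o n) := by
  have e : PySem.Chars.replace s [o] [n] = PySem.Chars.replace.go [o] [n] s.length s [] := by
    unfold PySem.Chars.replace; rfl
  rw [e, pvReplace_go_single o n s.length s [] le_rfl]
  simp

-- the composition of the nine single-character substitutions, in A's order, is pvMap
theorem pvChain_char (c : Char) :
    pvSub 'y' 'ɥ' (pvSub 'ḥ' 'ħ' (pvSub 'ḫ' 'χ' (pvSub 'ẖ' 'ç' (pvSub 'ḏ' 'ɟ'
      (pvSub 'ṯ' 'c' (pvSub 'ꜥ' 'ʕ' (pvSub 'ꜣ' 'ʔ' (pvSub 'š' 'ʃ' c)))))))) = pvMap c := by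
  rcases eq_or_ne c 'š' with rfl | h1
  · decide
  rcases eq_or_ne c 'ꜣ' with rfl | h2
  · decide
  rcases eq_or_ne c 'ꜥ' with rfl | h3
  · decide
  rcases eq_or_ne c 'ṯ' with rfl | h4
  · decide
  rcases eq_or_ne c 'ḏ' with rfl | h5
  · decide
  rcases eq_or_ne c 'ẖ' with rfl | h6
  · decide
  rcases eq_or_ne c 'ḫ' with rfl | h7
  · decide
  rcases eq_or_ne c 'ḥ' with rfl | h8
  · decide
  rcases eq_or_ne c 'y' with rfl | h9
  · decide
  rw [show pvSub 'š' 'ʃ' c = c from if_neg h1, show pvSub 'ꜣ' 'ʔ' c = c from if_neg h2,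
    show pvSub 'ꜥ' 'ʕ' c = c from if_neg h3, show pvSub 'ṯ' 'c' c = c from if_neg h4,
    show pvSub 'ḏ' 'ɟ' c = c from if_neg h5, show pvSub 'ẖ' 'ç' c = c from if_neg h6,
    show pvSub 'ḫ' 'χ' c = c from if_neg h7, show pvSub 'ḥ' 'ħ' c = c from if_neg h8,
    show pvSub 'y' 'ɥ' c = c from if_neg h9]
  unfold pvMap
  simp only [if_neg h1, if_neg h2, if_neg h3, if_neg h4, if_neg h5, if_neg h6, if_neg h7,
    if_neg h8, if_neg h9]

-- the nine chained replaces act character by character, as pvMap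
theorem pvRepl_toList (s : String) :
    (pvRepl s).toList = s.toList.map pvMap := by
  unfold pvRepl
  simp only [PySem.Str.toList_replace,
    show ("š" : String).toList = ['š'] from rfl, show ("ʃ" : String).toList = ['ʃ'] from rfl,
    show ("ꜣ" : String).toList = ['ꜣ'] from rfl, show ("ʔ" : String).toList = ['ʔ'] from rfl,
    show ("ꜥ" : String).toList = ['ꜥ'] from rfl, show ("ʕ" : String).toList = ['ʕ'] from rfl,
    show ("ṯ" : String).toList = ['ṯ'] from rfl, show ("c" : String).toList = ['c'] from rfl,
    show ("ḏ" : String).toList = ['ḏ'] from rfl, show ("ɟ" : String).toList = ['ɟ'] from rfl,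
    show ("ẖ" : String).toList = ['ẖ'] from rfl, show ("ç" : String).toList = ['ç'] from rfl,
    show ("ḫ" : String).toList = ['ḫ'] from rfl, show ("χ" : String).toList = ['χ'] from rfl,
    show ("ḥ" : String).toList = ['ḥ'] from rfl, show ("ħ" : String).toList = ['ħ'] from rfl,
    show ("y" : String).toList = ['y'] from rfl, show ("ɥ" : String).toList = ['ɥ'] from rfl,
    pvReplace_single, List.map_map]
  refine List.map_congr_left (fun c _ => ?_)
  simp only [Function.comp_apply]
  exact pvChain_char c

theorem pvMap_idem (c : Char) : pvMap (pvMap c) = pvMap c := by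
  rcases eq_or_ne c 'š' with rfl | h1
  · decide
  rcases eq_or_ne c 'ꜣ' with rfl | h2
  · decide
  rcases eq_or_ne c 'ꜥ' with rfl | h3
  · decide
  rcases eq_or_ne c 'ṯ' with rfl | h4
  · decide
  rcases eq_or_ne c 'ḏ' with rfl | h5
  · decide
  rcases eq_or_ne c 'ẖ' with rfl | h6
  · decide
  rcases eq_or_ne c 'ḫ' with rfl | h7
  · decide
  rcases eq_or_ne c 'ḥ' with rfl | h8
  · decide
  rcases eq_or_ne c 'y' with rfl | h9
  · decide
  have hc : pvMap c = c := by
    unfold pvMap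
    simp only [if_neg h1, if_neg h2, if_neg h3, if_neg h4, if_neg h5, if_neg h6, if_neg h7,
      if_neg h8, if_neg h9]
  rw [hc, hc]

theorem pvKeyNe (c k : Char) (h : c ≠ k) :
    ((String.ofList [k]) == (String.ofList [c])) = false := by
  simp only [beq_eq_false_iff_ne, ne_eq]
  intro hh; apply h
  have := congrArg String.toList hh
  simp only [String.toList_ofList] at this
  exact (List.cons.inj this).1.symm

-- B's table lookup on a single character computes pvMap
theorem pvTrans_getD (c : Char) :
    PySem.Dict.getD pvTrans (String.ofList [c]) (String.ofList [c]) = String.ofList [pvMap c] := by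
  unfold pvMap
  rcases eq_or_ne c 'š' with rfl | h1; · decide
  rcases eq_or_ne c 'ꜣ' with rfl | h2; · decide
  rcases eq_or_ne c 'ꜥ' with rfl | h3; · decide
  rcases eq_or_ne c 'ṯ' with rfl | h4; · decide
  rcases eq_or_ne c 'ḏ' with rfl | h5; · decide
  rcases eq_or_ne c 'ẖ' with rfl | h6; · decide
  rcases eq_or_ne c 'ḫ' with rfl | h7; · decide
  rcases eq_or_ne c 'ḥ' with rfl | h8; · decide
  rcases eq_or_ne c 'y' with rfl | h9; · decide
  have e : pvTrans = PySem.Dict.mk [(String.ofList ['š'], "ʃ"), (String.ofList ['ꜣ'], "ʔ"),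
    (String.ofList ['ꜥ'], "ʕ"), (String.ofList ['ṯ'], "c"), (String.ofList ['ḏ'], "ɟ"),
    (String.ofList ['ẖ'], "ç"), (String.ofList ['ḫ'], "χ"), (String.ofList ['ḥ'], "ħ"),
    (String.ofList ['y'], "ɥ")] := by decide
  rw [e]
  simp [PySem.Dict.getD, PySem.Dict.get?, List.find?,
    pvKeyNe c 'š' h1, pvKeyNe c 'ꜣ' h2, pvKeyNe c 'ꜥ' h3, pvKeyNe c 'ṯ' h4, pvKeyNe c 'ḏ' h5,
    pvKeyNe c 'ẖ' h6, pvKeyNe c 'ḫ' h7, pvKeyNe c 'ḥ' h8, pvKeyNe c 'y' h9,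
    h1, h2, h3, h4, h5, h6, h7, h8, h9]

-- "".join over chars is flatten
theorem pvJoin_nil_flatten (ps : List (List Char)) :
    PySem.Chars.join [] ps = ps.flatten := by
  show List.intercalate [] ps = ps.flatten
  simp only [List.intercalate]
  induction ps with
  | nil => rfl
  | cons a t ih => cases t <;> simp_all [List.intersperse]

-- mapping an already-mapped character list again changes nothing
theorem pvMapMap_fix (l : List Char) : (l.map pvMap).map pvMap = l.map pvMap := by
  induction l with
  | nil => rfl
  | cons d t iht => simp only [List.map_cons, iht, pvMap_idem]

-- B's per-character lookups, flattened back to characters, are exactly pvMap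
theorem pvLookup_flatten (l : List Char) :
    (((l.map (fun c => PySem.Dict.getD pvTrans (String.ofList [c]) (String.ofList [c]))).map
      String.toList).flatten) = l.map pvMap := by
  induction l with
  | nil => rfl
  | cons d t iht =>
    simp only [List.map_cons, List.flatten_cons, iht, pvTrans_getD d, String.toList_ofList,
      List.singleton_append]

-- the loop invariant: A's accumulated string is pvMap-saturated and equals B's joined output
theorem pv_inv (classes phonemes : List String) :
    ∀ (idxs : List Int) (accA : List Char) (outB : List String),
      accA.map pvMap = accA →
      (outB.map String.toList).flatten = accA →
      (idxs.foldl (fun consonants i =>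
        if PySem.List.pyGetD classes i "" = "C" then
          pvRepl (consonants ++ PySem.List.pyGetD phonemes i "")
        else consonants) (String.ofList accA)).toList
      = ((idxs.foldl (fun out i =>
          if PySem.List.pyGetD classes i "" = "C" then
            (PySem.List.pyGetD phonemes i "").toList.foldl
              (fun out c => out ++ [PySem.Dict.getD pvTrans (String.ofList [c]) (String.ofList [c])]) out
          else out) outB).map String.toList).flatten := by
  intro idxs
  induction idxs with
  | nil =>
    intro accA outB hfix hjoin
    simpa using hjoin.symm
  | cons i rest ih =>
    intro accA outB hfix hjoin
    simp only [List.foldl_cons]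
    by_cases hc : PySem.List.pyGetD classes i "" = "C"
    · rw [if_pos hc, if_pos hc]
      set p := PySem.List.pyGetD phonemes i ""
      have hA : (pvRepl (String.ofList accA ++ p)).toList = accA ++ p.toList.map pvMap := by
        rw [pvRepl_toList, String.toList_append]
        simp [List.map_append, String.toList_ofList, hfix]
      have hstr : pvRepl (String.ofList accA ++ p) = String.ofList (accA ++ p.toList.map pvMap) := by
        apply String.toList_inj.mp
        rw [hA, String.toList_ofList]
      rw [hstr, PySem.List.foldl_append_singleton_eq_map]
      apply ih
      · rw [List.map_append, hfix, pvMapMap_fix]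
      · rw [List.map_append, List.flatten_append, hjoin, pvLookup_flatten]
    · rw [if_neg hc, if_neg hc]
      exact ih accA outB hfix hjoin

-- ===== VERDICT (by name: the statement is the Claim_ definition above) =====
theorem extractConsonants_spec : Claim_equal_extractConsonants := by
  intro classes phonemes _ _
  unfold Spec_extractConsonants extractConsonants extractConsonants_alt
  apply String.toList_inj.mp
  rw [PySem.Str.toList_join, show ("" : String).toList = ([] : List Char) from rfl,
    pvJoin_nil_flatten]
  have h := pv_inv classes phonemes (PySem.List.pyRange 0 (classes.length : Int) 1) [] []
    (by simp) (by simp)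
  rw [show ("" : String) = String.ofList [] from by decide] at *
  exact h
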